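-- pv_equiv track=rewrite | github.com/dirtysalt/codes | leetcode/lcp-2022-fall-1.py | temperatureTrend
-- ===== SOURCE A (Python) =====
-- from typing import List
--
-- def temperatureTrend(temperatureA: List[int], temperatureB: List[int]) -> int:
--     ta = temperatureA
--     tb = temperatureB
--     n = len(ta)
--
--     def diff(x):
--         if x > 0:
--             return 1
--         elif x < 0:
--             return -1
--         return 0
--
--     ans = 0
--     t = 0
--     for i in range(1, n):
--         a = diff(ta[i] - ta[i - 1])
--         b = diff(tb[i] - tb[i - 1])
--         if a == b:
--             t += 1
--         else:
--             ans = max(ans, t)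
--             t = 0
--     ans = max(ans, t)
--     return ans
-- ===== SOURCE B (Python) =====
-- from typing import List
--
-- def temperatureTrend(temperatureA: List[int], temperatureB: List[int]) -> int:
--     def sign(x):
--         return (x > 0) - (x < 0)
--
--     matches = [sign(a2 - a1) == sign(b2 - b1)
--                for (a1, a2), (b1, b2) in zip(zip(temperatureA, temperatureA[1:]),
--                                              zip(temperatureB, temperatureB[1:]))]
--     # positions where the trends disagree, fenced by sentinels -1 and len(matches)
--     bad = [i for i, m in enumerate(matches) if not m]
--     bounds = [-1] + bad + [len(matches)]
--     # the longest run of agreements is the largest gap between consecutive mismatch boundaries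
--     return max(b2 - b1 - 1 for b1, b2 in zip(bounds, bounds[1:]))
-- ===== Notes on version B (the rewrite author's own statement) =====
-- stated objective: alternative
-- what changed: B replaces A's online counter/reset/max loop by a boundary-gap algorithm: it records the positions of all trend mismatches, fences them with sentinels -1 and len(matches), and returns the largest gap between consecutive boundaries minus one.
import Mathlib
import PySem

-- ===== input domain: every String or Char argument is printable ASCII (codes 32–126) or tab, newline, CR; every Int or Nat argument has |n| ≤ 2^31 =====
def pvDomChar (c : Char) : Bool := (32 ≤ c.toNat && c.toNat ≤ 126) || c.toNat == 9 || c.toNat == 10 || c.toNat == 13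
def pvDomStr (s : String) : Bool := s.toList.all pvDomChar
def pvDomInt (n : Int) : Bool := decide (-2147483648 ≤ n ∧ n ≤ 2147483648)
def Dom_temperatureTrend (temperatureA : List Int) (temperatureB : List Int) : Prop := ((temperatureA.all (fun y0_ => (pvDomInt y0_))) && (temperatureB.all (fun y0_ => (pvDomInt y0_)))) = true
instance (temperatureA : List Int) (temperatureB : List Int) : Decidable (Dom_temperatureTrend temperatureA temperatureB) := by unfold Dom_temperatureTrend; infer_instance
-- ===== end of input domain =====

-- B replaces A's online counter/reset/max loop by a boundary-gap algorithm: it records the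
-- positions of all trend mismatches, fences them with sentinels -1 and len(matches), and returns
-- the largest gap between consecutive boundaries minus one.

-- ===== PORT A =====
def temperatureTrend (temperatureA : List Int) (temperatureB : List Int) : Int :=
  let ta := temperatureA
  let tb := temperatureB
  let n : Int := ta.length
  let diff : Int → Int := fun x => if x > 0 then 1 else if x < 0 then -1 else 0
  let st := (PySem.List.pyRange 1 n 1).foldl (fun (s : Int × Int) i =>
      let a := diff (PySem.List.pyGetD ta i 0 - PySem.List.pyGetD ta (i - 1) 0)
      let b := diff (PySem.List.pyGetD tb i 0 - PySem.List.pyGetD tb (i - 1) 0)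
      if a == b then (s.1, s.2 + 1) else (max s.1 s.2, 0)) ((0 : Int), (0 : Int))
  max st.1 st.2

-- ===== PORT B =====
-- sign(x) = (x > 0) - (x < 0)
def pvSign (x : Int) : Int := (if x > 0 then 1 else 0) - (if x < 0 then 1 else 0)

-- the materialized comprehension over zip(zip(ta, ta[1:]), zip(tb, tb[1:]))
def pvMatchTable (ta tb : List Int) : List Bool :=
  ((ta.zip (PySem.List.slice ta (some 1) none)).zip (tb.zip (PySem.List.slice tb (some 1) none))).map
    (fun p => pvSign (p.1.2 - p.1.1) == pvSign (p.2.2 - p.2.1))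

def temperatureTrend_alt (temperatureA : List Int) (temperatureB : List Int) : Int :=
  let ms := pvMatchTable temperatureA temperatureB
  -- [i for i, m in enumerate(matches) if not m]  (zipIdx pairs are (value, index))
  let bad : List Int := ms.zipIdx.filterMap (fun p => if p.1 = false then some ((p.2 : Int)) else none)
  let bounds : List Int := (-1) :: (bad ++ [(ms.length : Int)])
  let gaps := (bounds.zip (PySem.List.slice bounds (some 1) none)).map (fun p => p.2 - p.1 - 1)
  match gaps with
  | g :: gs => gs.foldl max g
  | [] => 0  -- unreachable: bounds always has ≥ 2 elements (Python's max gets a nonempty generator)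

-- ===== PRECONDITION & SPEC =====
-- Pre_ excludes exactly the inputs on which A raises IndexError (tb shorter than ta while the loop runs).
def Pre_temperatureTrend (temperatureA : List Int) (temperatureB : List Int) : Prop :=
  temperatureA.length ≤ 1 ∨ temperatureA.length ≤ temperatureB.length
instance (temperatureA : List Int) (temperatureB : List Int) : Decidable (Pre_temperatureTrend temperatureA temperatureB) := by unfold Pre_temperatureTrend; infer_instance
def pvWitness_temperatureTrend : List Int × List Int := ([1, 2, 2, 5], [3, 4, 4, 1])

def Spec_temperatureTrend (temperatureA : List Int) (temperatureB : List Int) (out : Int) : Prop := out = temperatureTrend_alt temperatureA temperatureB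
instance (temperatureA : List Int) (temperatureB : List Int) (out : Int) : Decidable (Spec_temperatureTrend temperatureA temperatureB out) := by unfold Spec_temperatureTrend; infer_instance

-- ===== CLAIM (what is proved, stated in full; the proofs are below) =====
def Claim_equal_temperatureTrend : Prop := ∀ (temperatureA : List Int) (temperatureB : List Int), Dom_temperatureTrend temperatureA temperatureB → Pre_temperatureTrend temperatureA temperatureB → Spec_temperatureTrend temperatureA temperatureB (temperatureTrend temperatureA temperatureB)

-- ===== LEMMAS AND PROOFS =====

-- A's loop body abstracted over the match bit, and the reference scan pvR (best, leading-True run)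
def pvFA : Int × Int → Bool → Int × Int := fun s m => if m then (s.1, s.2 + 1) else (max s.1 s.2, 0)
def pvFB : Int × Int → Bool → Int × Int := fun s m => if m then (max s.1 (s.2 + 1), s.2 + 1) else (s.1, 0)
def pvR (ms : List Bool) : Int × Int := ms.foldr (fun m s => pvFB s m) (0, 0)

lemma pvR_nonneg (ms : List Bool) : 0 ≤ (pvR ms).1 ∧ 0 ≤ (pvR ms).2 ∧ (pvR ms).2 ≤ (pvR ms).1 := by
  induction ms with
  | nil => simp [pvR]
  | cons m ms ih =>
    rcases ih with ⟨h1, h2, h3⟩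
    cases m
    · simp_all [pvR, pvFB]
    · simp_all [pvR, pvFB]
      omega

-- the invariant tying A's forward fold to pvR
lemma pvFold_eq (ms : List Bool) : ∀ a t : Int, 0 ≤ t →
    max (ms.foldl pvFA (a, t)).1 (ms.foldl pvFA (a, t)).2
      = max a (max (pvR ms).1 (t + (pvR ms).2)) := by
  induction ms with
  | nil => intro a t ht; simp [pvR]; omega
  | cons m ms ih =>
    intro a t ht
    have hnn := pvR_nonneg ms
    cases m
    · have := ih (max a t) 0 le_rfl
      simp only [List.foldl_cons, pvR, List.foldr_cons, pvFA, pvFB] at *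
      simp at this ⊢
      omega
    · have := ih a (t + 1) (by omega)
      simp only [List.foldl_cons, pvR, List.foldr_cons, pvFA, pvFB] at *
      simp at this ⊢
      omega

-- the match table as a map over range (needs tb at least as long as ta)
lemma pvMatchTable_eq (ta tb : List Int) (h : ta.length ≤ tb.length) :
    pvMatchTable ta tb = (List.range (ta.length - 1)).map
      (fun k => pvSign (ta.getD (k + 1) 0 - ta.getD k 0) == pvSign (tb.getD (k + 1) 0 - tb.getD k 0)) := by
  apply List.ext_getElem
  · simp [pvMatchTable, PySem.List.slice_from]; omega
  · intro k h1 h2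
    have hk : k < ta.length - 1 := by
      have := h1; simp [pvMatchTable, PySem.List.slice_from] at this; omega
    have hk1 : k + 1 < ta.length := by omega
    have hk2 : k + 1 < tb.length := by omega
    have hk0 : k < ta.length := by omega
    have hk0' : k < tb.length := by omega
    simp [pvMatchTable, PySem.List.slice_from, List.getElem_zip,
      List.getD_eq_getElem?_getD, hk1, hk2, hk0, hk0']

-- A's result equals pvR's best component
lemma pvA_eq (ta tb : List Int) (h : ta.length ≤ tb.length ∨ ta.length ≤ 1) :
    temperatureTrend ta tb = (pvR (pvMatchTable ta tb)).1 := by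
  by_cases hn : ta.length ≤ 1
  · have hr : PySem.List.pyRange 1 (ta.length : Int) 1 = [] :=
      PySem.List.pyRange_one_eq_nil (by exact_mod_cast hn)
    have hm : pvMatchTable ta tb = [] := by
      match ta, hn with
      | [], _ => simp [pvMatchTable]
      | [x], _ => simp [pvMatchTable, PySem.List.slice_from]
    simp [temperatureTrend, hr, hm, pvR]
  · have h : ta.length ≤ tb.length := by rcases h with h | h; exact h; omega
    have hnn := pvR_nonneg (pvMatchTable ta tb)
    rw [pvMatchTable_eq ta tb h] at hnn ⊢
    simp only [temperatureTrend]
    rw [PySem.List.pyRange_one]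
    have hcut : ((ta.length : Int) - 1).toNat = ta.length - 1 := by omega
    rw [hcut, List.foldl_map]
    rw [PySem.List.foldl_congr_mem (g := fun (s : Int × Int) (k : Nat) => pvFA s
        (pvSign (ta.getD (k + 1) 0 - ta.getD k 0) == pvSign (tb.getD (k + 1) 0 - tb.getD k 0)))]
    · have := pvFold_eq ((List.range (ta.length - 1)).map
        (fun k => pvSign (ta.getD (k + 1) 0 - ta.getD k 0) == pvSign (tb.getD (k + 1) 0 - tb.getD k 0))) 0 0 le_rfl
      rw [List.foldl_map] at this
      rw [this]
      omega
    · intro s k hkmem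
      have e1 : (1 : Int) + (k : Int) = ((k + 1 : Nat) : Int) := by push_cast; ring
      have e3 : ((k + 1 : Nat) : Int) - 1 = ((k : Nat) : Int) := by push_cast; ring
      have hsgn : ∀ x : Int, (if x > 0 then (1 : Int) else if x < 0 then -1 else 0) = pvSign x := by
        intro x; unfold pvSign; split_ifs <;> omega
      simp only [e1, e3, PySem.List.pyGetD_natCast]
      simp only [hsgn, pvFA]

-- B-side: reference shapes for the mismatch positions and the gap list
def pvBadL : List Bool → Int → List Int
  | [], _ => []
  | m :: r, n => (if m then [] else [n]) ++ pvBadL r (n + 1)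

def pvGapsFrom : Int → List Int → List Int
  | _, [] => []
  | p, x :: xs => (x - p - 1) :: pvGapsFrom x xs

lemma pvBad_port (ms : List Bool) : ∀ k : Nat,
    (List.zipIdx ms k).filterMap (fun p => if p.1 = false then some ((p.2 : Int)) else none)
      = pvBadL ms (k : Int) := by
  induction ms with
  | nil => intro k; simp [pvBadL]
  | cons m r ih =>
    intro k
    have hk : ((k + 1 : Nat) : Int) = (k : Int) + 1 := by push_cast; ring
    cases m <;> simp [pvBadL, ih (k + 1), hk]

lemma pvBadL_shift (ms : List Bool) : ∀ n : Int, pvBadL ms n = (pvBadL ms 0).map (· + n) := by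
  induction ms with
  | nil => intro n; simp [pvBadL]
  | cons m r ih =>
    intro n
    have h1 : pvBadL r (n + 1) = (pvBadL r 0).map (· + (n + 1)) := ih (n + 1)
    have h2 : pvBadL r 1 = (pvBadL r 0).map (· + 1) := by simpa using ih 1
    cases m <;> simp [pvBadL, h1, h2, List.map_map] <;> exact fun a _ => by omega

lemma pvGapsFrom_map (l : List Int) : ∀ p c : Int,
    pvGapsFrom (p + c) (l.map (· + c)) = pvGapsFrom p l := by
  induction l with
  | nil => intro p c; simp [pvGapsFrom]
  | cons x xs ih =>
    intro p c
    simp only [List.map_cons, pvGapsFrom, ih x c]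
    congr 1
    omega

lemma pvFoldl_max_init (l : List Int) : ∀ a b : Int,
    l.foldl max (max a b) = max a (l.foldl max b) := by
  induction l with
  | nil => intro a b; simp
  | cons x xs ih =>
    intro a b
    simp only [List.foldl_cons, max_assoc]
    exact ih a (max b x)

lemma pvZipGaps (l : List Int) : ∀ a : Int,
    (((a :: l).zip l).map (fun p => p.2 - p.1 - 1)) = pvGapsFrom a l := by
  induction l with
  | nil => intro a; simp [pvGapsFrom]
  | cons x xs ih => intro a; simp [pvGapsFrom, ih x]

-- the main invariant: the gap list of the fenced mismatch positions is lead :: gs with max = best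
lemma pvMain (ms : List Bool) :
    ∃ gs, pvGapsFrom (-1) (pvBadL ms 0 ++ [(ms.length : Int)]) = (pvR ms).2 :: gs ∧
          gs.foldl max (pvR ms).2 = (pvR ms).1 := by
  induction ms with
  | nil => exact ⟨[], by norm_num [pvBadL, pvGapsFrom, pvR], by simp [pvR]⟩
  | cons m r ih =>
    rcases ih with ⟨gs, hG, hM⟩
    rcases pvR_nonneg r with ⟨hb, hl, hlb⟩
    have hlen : ((r.length + 1 : Nat) : Int) = (r.length : Int) + 1 := by push_cast; ring
    -- the fenced list for r, nonempty
    obtain ⟨x, xs, hx⟩ : ∃ x xs, pvBadL r 0 ++ [(r.length : Int)] = x :: xs := by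
      cases h : pvBadL r 0 ++ [(r.length : Int)] with
      | nil => exact absurd h (by simp)
      | cons x xs => exact ⟨x, xs, rfl⟩
    rw [hx] at hG
    simp only [pvGapsFrom] at hG
    have hxlead : x - (-1) - 1 = (pvR r).2 := (List.cons.injEq _ _ _ _ ▸ hG).1
    have hxs : pvGapsFrom x xs = gs := (List.cons.injEq _ _ _ _ ▸ hG).2
    have hxval : x = (pvR r).2 := by omega
    cases m with
    | true =>
      have hbad : pvBadL (true :: r) 0 = (pvBadL r 0).map (· + 1) := by
        simp [pvBadL, pvBadL_shift r 1]
      have hlist : pvBadL (true :: r) 0 ++ [((true :: r).length : Int)]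
          = ((x + 1) :: xs.map (· + 1)) := by
        simp only [hbad, List.length_cons, hlen]
        have : (pvBadL r 0).map (· + 1) ++ [(r.length : Int) + 1]
            = (pvBadL r 0 ++ [(r.length : Int)]).map (· + 1) := by simp
        rw [this, hx]; simp
      have hR : pvR (true :: r) = (max (pvR r).1 ((pvR r).2 + 1), (pvR r).2 + 1) := by
        simp [pvR, pvFB]
      refine ⟨gs, ?_, ?_⟩
      · rw [hlist]
        simp only [pvGapsFrom, hR]
        congr 1
        · omega
        · rw [pvGapsFrom_map xs x 1, hxs]
      · rw [hR]
        have h1 : (pvR r).2 + 1 = max ((pvR r).2 + 1) ((pvR r).2) := by omega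
        calc gs.foldl max ((pvR r).2 + 1)
            = gs.foldl max (max ((pvR r).2 + 1) ((pvR r).2)) := by rw [← h1]
          _ = max ((pvR r).2 + 1) (gs.foldl max ((pvR r).2)) := pvFoldl_max_init gs _ _
          _ = max ((pvR r).2 + 1) ((pvR r).1) := by rw [hM]
          _ = max ((pvR r).1) ((pvR r).2 + 1) := max_comm _ _
    | false =>
      have hbad : pvBadL (false :: r) 0 = 0 :: (pvBadL r 0).map (· + 1) := by
        simp [pvBadL, pvBadL_shift r 1]
      have hlist : pvBadL (false :: r) 0 ++ [((false :: r).length : Int)]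
          = 0 :: (pvBadL r 0 ++ [(r.length : Int)]).map (· + 1) := by
        simp only [hbad, List.length_cons, hlen]
        simp
      have hR : pvR (false :: r) = ((pvR r).1, 0) := by simp [pvR, pvFB]
      refine ⟨(pvR r).2 :: gs, ?_, ?_⟩
      · rw [hlist]
        simp only [pvGapsFrom, hR]
        rw [List.cons.injEq]
        refine ⟨by norm_num, ?_⟩
        · have hsh := pvGapsFrom_map (pvBadL r 0 ++ [(r.length : Int)]) (-1) 1
          norm_num at hsh
          simp only [List.map_append, List.map_cons, List.map_nil]
          rw [hsh, hx]
          simp only [pvGapsFrom]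
          rw [hxlead, hxs]
      · rw [hR]
        simp only [List.foldl_cons]
        have : max (0 : Int) ((pvR r).2) = (pvR r).2 := by omega
        rw [this, hM]

-- B's result equals pvR's best component (for all inputs)
lemma pvB_eq (ta tb : List Int) :
    temperatureTrend_alt ta tb = (pvR (pvMatchTable ta tb)).1 := by
  set ms := pvMatchTable ta tb with hms
  rcases pvMain ms with ⟨gs, hG, hM⟩
  have hbad := pvBad_port ms 0
  simp only [Nat.cast_zero] at hbad
  simp only [temperatureTrend_alt, ← hms, hbad, PySem.List.slice_from_one, List.tail_cons]
  rw [pvZipGaps (pvBadL ms 0 ++ [(ms.length : Int)]) (-1), hG]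
  exact hM

-- ===== VERDICT (by name: the statement is the Claim_ definition above) =====
theorem temperatureTrend_spec : Claim_equal_temperatureTrend := by
  intro ta tb _ hpre
  unfold Spec_temperatureTrend
  rw [pvB_eq]
  exact pvA_eq ta tb (by rcases hpre with h | h; exact Or.inr h; exact Or.inl h)
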